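-- pv_equiv track=rewrite | github.com/Kuhron/programming | Genetics/GeneticPath.py | split_pairs_by_delimiter
-- ===== SOURCE A (Python) =====
-- def split_pairs_by_delimiter(pairs):
--     res = []
--     current_run = []
--     for p in pairs:
--         if p == [1, 1]:  # delimiter
--             res.append(current_run)
--             current_run = []
--         else:
--             current_run.append(p)
--     res.append(current_run)
--     return res
-- ===== SOURCE B (Python) =====
-- def split_pairs_by_delimiter(pairs):
--     positions = [i for i, p in enumerate(pairs) if p == [1, 1]]
--     res = []
--     start = 0
--     for pos in positions:
--         res.append(pairs[start:pos])
--         start = pos + 1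
--     res.append(pairs[start:])
--     return res
-- ===== Notes on version B (the rewrite author's own statement) =====
-- stated objective: alternative
-- what changed: Replaces the per-element run accumulator with one pass collecting delimiter indices plus a slicing pass that cuts the list between consecutive delimiter positions.
import Mathlib
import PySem

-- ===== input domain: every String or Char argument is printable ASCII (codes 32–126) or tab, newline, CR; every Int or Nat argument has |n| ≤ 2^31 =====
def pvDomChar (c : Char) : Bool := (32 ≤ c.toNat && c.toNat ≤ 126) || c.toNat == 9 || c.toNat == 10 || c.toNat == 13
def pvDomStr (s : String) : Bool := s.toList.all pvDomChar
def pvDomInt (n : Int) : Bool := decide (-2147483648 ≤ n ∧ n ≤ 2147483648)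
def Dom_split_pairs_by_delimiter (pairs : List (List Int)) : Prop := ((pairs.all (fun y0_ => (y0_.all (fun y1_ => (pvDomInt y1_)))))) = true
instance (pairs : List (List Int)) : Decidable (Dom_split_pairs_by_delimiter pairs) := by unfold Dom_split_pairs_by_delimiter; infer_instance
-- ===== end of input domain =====

-- B collects the delimiter indices in one pass and builds the groups by slicing between
-- consecutive delimiter positions, instead of A's per-element run accumulator.

-- ===== PORT A =====
-- accumulator state: (res, current_run)
def split_pairs_by_delimiter (pairs : List (List Int)) : List (List (List Int)) :=
  let st := pairs.foldl
    (fun (st : List (List (List Int)) × List (List Int)) p =>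
      if p = [1, 1] then (st.1 ++ [st.2], []) else (st.1, st.2 ++ [p]))
    ([], [])
  st.1 ++ [st.2]

-- ===== PORT B =====
-- positions = [i for i, p in enumerate(pairs) if p == [1, 1]]; accumulator state: (res, start)
def split_pairs_by_delimiter_alt (pairs : List (List Int)) : List (List (List Int)) :=
  let positions :=
    ((PySem.List.enumerate pairs).filter (fun ip => decide (ip.2 = [1, 1]))).map Prod.fst
  let st := positions.foldl
    (fun (st : List (List (List Int)) × Int) pos =>
      (st.1 ++ [PySem.List.slice pairs (some st.2) (some pos)], pos + 1))
    ([], 0)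
  st.1 ++ [PySem.List.slice pairs (some st.2) none]

-- ===== PRECONDITION & SPEC =====
def Spec_split_pairs_by_delimiter (pairs : List (List Int)) (out : List (List (List Int))) : Prop := out = split_pairs_by_delimiter_alt pairs
instance (pairs : List (List Int)) (out : List (List (List Int))) : Decidable (Spec_split_pairs_by_delimiter pairs out) := by unfold Spec_split_pairs_by_delimiter; infer_instance

-- ===== CLAIM (what is proved, stated in full; the proofs are below) =====
def Claim_equal_split_pairs_by_delimiter : Prop := ∀ (pairs : List (List Int)), Dom_split_pairs_by_delimiter pairs → Spec_split_pairs_by_delimiter pairs (split_pairs_by_delimiter pairs)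

-- ===== LEMMAS AND PROOFS =====

-- reference splitter both ports are reduced to
def specGo : List (List Int) → List (List (List Int))
  | [] => [[]]
  | p :: rest => if p = [1, 1] then [] :: specGo rest else (specGo rest).modifyHead (p :: ·)

theorem specGo_ne_nil (l : List (List Int)) : specGo l ≠ [] := by
  cases l with
  | nil => simp [specGo]
  | cons p rest =>
    simp only [specGo]
    split
    · simp
    · cases h : specGo rest with
      | nil => exact absurd h (specGo_ne_nil rest)
      | cons a t => simp [List.modifyHead]

theorem modifyHead_comp {α : Type} (l : List α) (f g : α → α) (h : l ≠ []) :
    (l.modifyHead g).modifyHead f = l.modifyHead (fun x => f (g x)) := by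
  cases l with
  | nil => exact absurd rfl h
  | cons a t => simp [List.modifyHead]

theorem foldA_eq (pairs : List (List Int)) :
    ∀ (res : List (List (List Int))) (cur : List (List Int)),
    (let st := pairs.foldl
        (fun (st : List (List (List Int)) × List (List Int)) p =>
          if p = [1, 1] then (st.1 ++ [st.2], []) else (st.1, st.2 ++ [p]))
        (res, cur)
     st.1 ++ [st.2])
    = res ++ (specGo pairs).modifyHead (cur ++ ·) := by
  induction pairs with
  | nil => intro res cur; simp [specGo, List.modifyHead]
  | cons p rest ih =>
    intro res cur
    simp only [List.foldl_cons, specGo]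
    by_cases hp : p = [1, 1]
    · simp only [hp]
      rw [ih]
      cases hsg : specGo rest with
      | nil => exact absurd hsg (specGo_ne_nil rest)
      | cons a t => simp [List.modifyHead]
    · simp only [if_neg hp]
      rw [ih, modifyHead_comp _ _ _ (specGo_ne_nil rest)]
      cases hsg : specGo rest with
      | nil => exact absurd hsg (specGo_ne_nil rest)
      | cons a t => simp [List.modifyHead]

def foldB (L : List (List Int)) (ps : List Int) (res : List (List (List Int))) (start : Int) : List (List (List Int)) :=
  let st := ps.foldl
    (fun (st : List (List (List Int)) × Int) pos =>
      (st.1 ++ [PySem.List.slice L (some st.2) (some pos)], pos + 1))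
    (res, start)
  st.1 ++ [PySem.List.slice L (some st.2) none]

theorem foldB_cons (L : List (List Int)) (p : Int) (ps : List Int) (res : List (List (List Int))) (start : Int) :
    foldB L (p :: ps) res start = foldB L ps (res ++ [PySem.List.slice L (some start) (some p)]) (p + 1) := rfl

theorem alt_eq_foldB (pairs : List (List Int)) :
    split_pairs_by_delimiter_alt pairs
      = foldB pairs (((PySem.List.enumerate pairs).filter (fun ip => decide (ip.2 = [1, 1]))).map Prod.fst) [] 0 := rfl

theorem foldB_eq (L : List (List Int)) (tail : List (List Int)) :
    ∀ (mid : List (List Int)) (start : Nat) (res : List (List (List Int))),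
    L.drop start = mid ++ tail →
    foldB L (((PySem.List.enumerate tail ((start : Int) + (mid.length : Int))).filter
        (fun ip => decide (ip.2 = [1, 1]))).map Prod.fst) res (start : Int)
    = res ++ (specGo tail).modifyHead (mid ++ ·) := by
  induction tail with
  | nil =>
    intro mid start res hdrop
    simp only [PySem.List.enumerate_nil, List.filter_nil, List.map_nil, foldB, List.foldl_nil]
    rw [PySem.List.slice_from_natCast, hdrop]
    simp [specGo, List.modifyHead]
  | cons x rest ih =>
    intro mid start res hdrop
    rw [PySem.List.enumerate_cons]
    have hdropS : L.drop (start + mid.length) = x :: rest := by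
      rw [← List.drop_drop, hdrop, List.drop_left]
    have hdrop1 : L.drop (start + mid.length + 1) = rest := by
      have h3 := congrArg (List.drop 1) hdropS
      simpa [List.drop_drop, Nat.add_comm] using h3
    by_cases hx : x = [1, 1]
    · simp only [List.filter_cons, hx, decide_true, if_true, List.map_cons, foldB_cons]
      have hstep : PySem.List.slice L (some (start : Int)) (some ((start : Int) + (mid.length : Int))) = mid := by
        rw [PySem.List.slice_natCast_add, hdrop, List.take_left]
      rw [hstep]
      have key := ih [] (start + mid.length + 1) (res ++ [mid]) (by simpa using hdrop1)
      push_cast at key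
      simp only [List.length_nil, Int.natCast_zero, add_zero] at key
      rw [key]
      simp only [specGo]
      cases hsg : specGo rest with
      | nil => exact absurd hsg (specGo_ne_nil rest)
      | cons a t => simp [List.modifyHead]
    · have key := ih (mid ++ [x]) start res (by simpa using hdrop)
      simp only [List.filter_cons, hx, decide_false, Bool.false_eq_true, if_false,
        List.length_append, List.length_cons, List.length_nil] at key ⊢
      push_cast at key
      rw [show ((start : Int) + ((mid.length : Int) + 1)) = (start : Int) + (mid.length : Int) + 1 from by ring] at key
      rw [key]
      simp only [specGo, if_neg hx]
      rw [modifyHead_comp _ _ _ (specGo_ne_nil rest)]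
      cases hsg : specGo rest with
      | nil => exact absurd hsg (specGo_ne_nil rest)
      | cons a t => simp [List.modifyHead]

theorem split_pairs_by_delimiter_spec : Claim_equal_split_pairs_by_delimiter := by
  intro pairs _
  unfold Spec_split_pairs_by_delimiter
  have hA := foldA_eq pairs [] []
  have hB := foldB_eq pairs pairs [] 0 [] (by simp)
  simp only [Int.natCast_zero, List.length_nil, add_zero] at hB
  rw [split_pairs_by_delimiter, alt_eq_foldB, hB]
  rw [show (pairs.foldl (fun (st : List (List (List Int)) × List (List Int)) p =>
      if p = [1, 1] then (st.1 ++ [st.2], []) else (st.1, st.2 ++ [p])) ([], [])).1 ++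
      [(pairs.foldl (fun (st : List (List (List Int)) × List (List Int)) p =>
      if p = [1, 1] then (st.1 ++ [st.2], []) else (st.1, st.2 ++ [p])) ([], [])).2]
      = [] ++ (specGo pairs).modifyHead ([] ++ ·) from hA]
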